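-- pv_equiv track=rewrite | github.com/MathRdt/advent-of-code | src/2023/14/part_one.py | tilt_matrix
-- ===== SOURCE A (Python) =====
-- def tilt_matrix(input_matrix: list[list[str]]) -> list[list[str]]:
--     inversed_transposed_matrix = [list(line)[::-1] for line in zip(*input_matrix)]
--
--     for line in inversed_transposed_matrix:
--         mobile_rocks = [i for i, x in enumerate(line) if x == "O"][::-1]
--         for mobile_rock in mobile_rocks:
--             new_index = mobile_rock
--             while new_index + 1 < len(line):
--                 if line[new_index + 1] != ".":
--                     break
--                 new_index += 1
--             if new_index != mobile_rock:
--                 line[new_index] = "O"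
--                 line[mobile_rock] = "."
--     return [list(line) for line in zip(*inversed_transposed_matrix)]
-- ===== SOURCE B (Python) =====
-- def _tilt_up(col):
--     # single sweep: within each segment between obstacles, rocks "O" first, then dots
--     out = []
--     rocks = dots = 0
--     for x in col:
--         if x == "O":
--             rocks += 1
--         elif x == ".":
--             dots += 1
--         else:
--             out += ["O"] * rocks + ["."] * dots + [x]
--             rocks = dots = 0
--     out += ["O"] * rocks + ["."] * dots
--     return out
--
--
-- def tilt_matrix(input_matrix: list[list[str]]) -> list[list[str]]:
--     width = min((len(row) for row in input_matrix), default=0)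
--     if width == 0:
--         return []
--     cols = [[row[j] for row in input_matrix] for j in range(width)]
--     tilted = [_tilt_up(col) for col in cols]
--     return [[col[i] for col in tilted] for i in range(len(input_matrix))][::-1]
-- ===== Notes on version B (the rewrite author's own statement) =====
-- stated objective: alternative
-- what changed: A slides each rock individually with an inner while-scan over the line (worst-case quadratic per line); B does one linear sweep per column counting rocks and gaps per segment between obstacles and emits each segment in tilted order, assembling the result by a direct transpose plus row reversal instead of A's double zip with per-line reversal.
import Mathlib
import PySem

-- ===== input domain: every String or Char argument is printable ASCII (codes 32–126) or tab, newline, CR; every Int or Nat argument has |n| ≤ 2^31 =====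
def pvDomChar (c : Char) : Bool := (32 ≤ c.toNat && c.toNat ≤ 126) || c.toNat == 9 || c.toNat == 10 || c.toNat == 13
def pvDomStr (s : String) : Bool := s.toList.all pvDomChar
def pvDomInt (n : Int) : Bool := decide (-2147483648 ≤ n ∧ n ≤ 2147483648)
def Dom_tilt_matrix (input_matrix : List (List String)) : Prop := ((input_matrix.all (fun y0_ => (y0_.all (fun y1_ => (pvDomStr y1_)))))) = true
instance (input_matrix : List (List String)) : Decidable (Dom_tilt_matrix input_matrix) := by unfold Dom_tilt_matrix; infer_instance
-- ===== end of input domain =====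

-- B changes the algorithm: one counting sweep per column instead of A's per-rock while-scan slides;
-- no speed is claimed (a timing run did not measure B faster on its generated inputs).

-- Python's min(len(row) for row in rows, default=0): used by both ports (A through zip's
-- truncation to the shortest row, B explicitly).
def minWidth (rows : List (List String)) : Nat :=
  match rows with
  | [] => 0
  | r :: rs => rs.foldl (fun m x => min m x.length) r.length

-- ===== PORT A =====

-- Python's zip(*rows): the i-th output row holds the i-th element of every row, for i below the
-- minimum row length (exact semantics of the builtin; rows[j][i] is always in range since i < minimum length).
def pyZip (rows : List (List String)) : List (List String) :=
  (List.range (minWidth rows)).map (fun i => rows.map (fun r => r.getD i ""))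

-- [i for i, x in enumerate(line) if x == "O"] (indices as Nat: enumerate indices are the positions 0,1,…)
def rocksAsc (ln : List String) (i : Nat) : List Nat :=
  match ln with
  | [] => []
  | x :: xs => if x == "O" then i :: rocksAsc xs (i + 1) else rocksAsc xs (i + 1)

-- the while loop: while new_index + 1 < len(line) and line[new_index+1] == ".": new_index += 1
def slideScan (ln : List String) (n : Nat) : Nat :=
  if h : n + 1 < ln.length then
    if ln[n + 1] != "." then n
    else slideScan ln (n + 1)
  else n
termination_by ln.length - n

-- body of "for mobile_rock in mobile_rocks"
def slideRock (ln : List String) (r : Nat) : List String :=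
  let n := slideScan ln r
  if n ≠ r then (ln.set n "O").set r "." else ln

-- the per-line for loop of A
def rollLine (ln : List String) : List String :=
  ((rocksAsc ln 0).reverse).foldl slideRock ln

def tilt_matrix (input_matrix : List (List String)) : List (List String) :=
  let inversed_transposed_matrix := (pyZip input_matrix).map List.reverse
  let mutated := inversed_transposed_matrix.map rollLine
  pyZip mutated

-- ===== PORT B =====

-- loop body of _tilt_up: state (out, rocks, dots)
def tiltStep : (List String × Nat × Nat) → String → (List String × Nat × Nat)
  | (out, rocks, dots), x =>
    if x == "O" then (out, rocks + 1, dots)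
    else if x == "." then (out, rocks, dots + 1)
    else (out ++ List.replicate rocks "O" ++ List.replicate dots "." ++ [x], 0, 0)

def tiltUp (col : List String) : List String :=
  let s := col.foldl tiltStep ([], 0, 0)
  s.1 ++ List.replicate s.2.1 "O" ++ List.replicate s.2.2 "."

def tilt_matrix_alt (input_matrix : List (List String)) : List (List String) :=
  let width := minWidth input_matrix
  if width == 0 then []
  else
    let cols := (List.range width).map (fun j => input_matrix.map (fun row => row.getD j ""))
    let tilted := cols.map tiltUp
    ((List.range input_matrix.length).map (fun i => tilted.map (fun col => col.getD i ""))).reverse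

-- ===== PRECONDITION & SPEC =====
def Spec_tilt_matrix (input_matrix : List (List String)) (out : List (List String)) : Prop := out = tilt_matrix_alt input_matrix
instance (input_matrix : List (List String)) (out : List (List String)) : Decidable (Spec_tilt_matrix input_matrix out) := by unfold Spec_tilt_matrix; infer_instance

-- ===== CLAIM (what is proved, stated in full; the proofs are below) =====
def Claim_equal_tilt_matrix : Prop := ∀ (input_matrix : List (List String)), Dom_tilt_matrix input_matrix → Spec_tilt_matrix input_matrix (tilt_matrix input_matrix)

-- ===== LEMMAS AND PROOFS =====

-- ---- generic list helpers ----

lemma foldl_min_const (rs : List (List String)) (H : Nat) (h : ∀ c ∈ rs, c.length = H) :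
    rs.foldl (fun m x => min m x.length) H = H := by
  induction rs with
  | nil => rfl
  | cons r rs ih =>
    have hr : r.length = H := h r (by simp)
    simp only [List.foldl_cons, hr, min_self]
    exact ih (fun c hc => h c (by simp [hc]))

lemma minWidth_const (ls : List (List String)) (H : Nat) (hne : ls ≠ [])
    (h : ∀ c ∈ ls, c.length = H) : minWidth ls = H := by
  cases ls with
  | nil => exact absurd rfl hne
  | cons r rs =>
    have hr : r.length = H := h r (by simp)
    simp only [minWidth, hr]
    exact foldl_min_const rs H (fun c hc => h c (by simp [hc]))

lemma set_middle (l1 : List String) (a b : String) (l2 : List String) :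
    (l1 ++ a :: l2).set l1.length b = l1 ++ b :: l2 := by
  induction l1 with
  | nil => rfl
  | cons x xs ih => simpa using ih

lemma replicate_cons_self (o : Nat) (X : List String) :
    List.replicate o "O" ++ "O" :: X = "O" :: (List.replicate o "O" ++ X) := by
  rw [show ("O" :: X) = ["O"] ++ X from rfl, ← List.append_assoc, ← List.replicate_succ',
    List.replicate_succ, List.cons_append]

lemma dots_takeWhile (d : Nat) (r : List String) (hr : r.head? ≠ some ".") :
    ((List.replicate d "." ++ r).takeWhile (fun s => s == ".")).length = d := by
  induction d with
  | zero =>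
    cases r with
    | nil => rfl
    | cons y ys =>
      have hy : (y == ".") = false := by
        cases h : y == "." with
        | true => exact absurd (by simp [eq_of_beq h]) hr
        | false => rfl
      simp [List.takeWhile_cons, hy]
  | succ d ih => simpa [List.replicate_succ, List.takeWhile_cons] using ih

lemma drop_replicate (d : Nat) (r : List String) :
    (List.replicate d "." ++ r).drop d = r := by
  have := List.drop_left (l₁ := List.replicate d ".") (l₂ := r)
  simpa using this

-- ---- A-side: characterising rollLine ----

lemma rocksAsc_shift (l : List String) (i : Nat) :
    rocksAsc l (i + 1) = (rocksAsc l i).map (· + 1) := by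
  induction l generalizing i with
  | nil => rfl
  | cons x xs ih =>
    by_cases h : x == "O" <;> simp [rocksAsc, h, ih]

lemma slideScan_spec (l : List String) (n : Nat) :
    slideScan l n = n + ((l.drop (n + 1)).takeWhile (fun s => s == ".")).length := by
  suffices h : ∀ fuel n, l.length - n ≤ fuel →
      slideScan l n = n + ((l.drop (n + 1)).takeWhile (fun s => s == ".")).length from
    h (l.length - n) n le_rfl
  intro fuel
  induction fuel with
  | zero =>
    intro n hn
    rw [slideScan, dif_neg (by omega), List.drop_eq_nil_of_le (by omega)]
    simp
  | succ fuel ih =>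
    intro n hn
    rw [slideScan]
    by_cases hlt : n + 1 < l.length
    · rw [dif_pos hlt, List.drop_eq_getElem_cons hlt]
      by_cases hd : l[n + 1]'hlt = "."
      · rw [if_neg (by simp [hd])]
        rw [ih (n + 1) (by omega)]
        simp only [List.takeWhile_cons, hd, beq_self_eq_true, if_pos, List.length_cons]
        omega
      · rw [if_pos (by simpa using hd)]
        have hb : ((l[n + 1]'hlt) == ".") = false := by simpa using hd
        simp [List.takeWhile_cons, hb]
    · rw [dif_neg hlt, List.drop_eq_nil_of_le (by omega)]
      simp

lemma slideScan_cons (x : String) (l : List String) (r : Nat) :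
    slideScan (x :: l) (r + 1) = slideScan l r + 1 := by
  rw [slideScan_spec, slideScan_spec, List.drop_succ_cons]
  omega

lemma slideRock_cons (x : String) (l : List String) (r : Nat) :
    slideRock (x :: l) (r + 1) = x :: slideRock l r := by
  unfold slideRock
  rw [slideScan_cons]
  by_cases h : slideScan l r = r
  · rw [h]; simp
  · rw [if_pos (by omega : slideScan l r + 1 ≠ r + 1), if_pos h]
    rfl

lemma foldl_slideRock_cons (x : String) (rs : List Nat) (l : List String) :
    (rs.map (· + 1)).foldl slideRock (x :: l) = x :: rs.foldl slideRock l := by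
  induction rs generalizing l with
  | nil => rfl
  | cons r rs ih => simp [slideRock_cons, ih]

lemma rollLine_cons_not_O (x : String) (xs : List String) (hx : (x == "O") = false) :
    rollLine (x :: xs) = x :: rollLine xs := by
  unfold rollLine
  rw [show rocksAsc (x :: xs) 0 = rocksAsc xs 1 by simp [rocksAsc, hx]]
  rw [show (1 : Nat) = 0 + 1 from rfl, rocksAsc_shift, ← List.map_reverse]
  exact foldl_slideRock_cons x _ xs

lemma slideRock_O_zero (t : List String) :
    slideRock ("O" :: t) 0 =
      List.replicate ((t.takeWhile (fun s => s == ".")).length) "." ++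
        "O" :: t.drop ((t.takeWhile (fun s => s == ".")).length) := by
  obtain ⟨k, hk⟩ : ∃ k, (t.takeWhile (fun s => s == ".")).length = k := ⟨_, rfl⟩
  rw [hk]
  have hscan : slideScan ("O" :: t) 0 = k := by
    rw [slideScan_spec]; simpa using hk
  have htw : t.takeWhile (fun s => s == ".") = List.replicate k "." := by
    have h0 : t.takeWhile (fun s => s == ".") =
        List.replicate (t.takeWhile (fun s => s == ".")).length "." :=
      List.eq_replicate_of_mem
        (fun b hb => eq_of_beq (List.mem_takeWhile_imp (p := fun s => s == ".") hb))
    rw [hk] at h0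
    exact h0
  have ht : t = List.replicate k "." ++ t.drop k := by
    have hdw : t.drop k = t.dropWhile (fun s => s == ".") := by
      conv_lhs => rw [← List.takeWhile_append_dropWhile (p := fun s => s == ".") (l := t)]
      rw [htw]
      exact drop_replicate k _
    rw [hdw]
    conv_lhs => rw [← List.takeWhile_append_dropWhile (p := fun s => s == ".") (l := t)]
    rw [htw]
  unfold slideRock
  rw [hscan]
  cases k with
  | zero => simp
  | succ k' =>
    rw [if_pos (Nat.succ_ne_zero k')]
    conv_lhs => rw [ht]
    have hsh : ("O" :: (List.replicate (k' + 1) "." ++ t.drop (k' + 1))) =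
        ("O" :: List.replicate k' ".") ++ "." :: t.drop (k' + 1) := by
      rw [List.replicate_succ']
      simp
    rw [hsh]
    have hset := set_middle ("O" :: List.replicate k' ".") "." "O" (t.drop (k' + 1))
    simp only [List.length_cons, List.length_replicate] at hset
    rw [hset]
    simp [List.replicate_succ]

lemma rollLine_cons_O (xs : List String) :
    rollLine ("O" :: xs) =
      List.replicate (((rollLine xs).takeWhile (fun s => s == ".")).length) "." ++
        "O" :: (rollLine xs).drop (((rollLine xs).takeWhile (fun s => s == ".")).length) := by
  unfold rollLine
  rw [show rocksAsc ("O" :: xs) 0 = 0 :: rocksAsc xs 1 by simp [rocksAsc]]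
  rw [show (1 : Nat) = 0 + 1 from rfl, rocksAsc_shift]
  simp only [List.reverse_cons, ← List.map_reverse, List.foldl_append, List.foldl_cons,
    List.foldl_nil]
  rw [foldl_slideRock_cons]
  exact slideRock_O_zero _

-- ---- B-side: characterising tiltUp ----

lemma tiltStep_O (a : List String) (o d : Nat) (x : String) (h : (x == "O") = true) :
    tiltStep (a, o, d) x = (a, o + 1, d) := by
  simp [tiltStep, h]

lemma tiltStep_dot (a : List String) (o d : Nat) (x : String) (h1 : (x == "O") = false)
    (h2 : (x == ".") = true) : tiltStep (a, o, d) x = (a, o, d + 1) := by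
  simp [tiltStep, h1, h2]

lemma tiltStep_obs (a : List String) (o d : Nat) (x : String) (h1 : (x == "O") = false)
    (h2 : (x == ".") = false) :
    tiltStep (a, o, d) x = (a ++ List.replicate o "O" ++ List.replicate d "." ++ [x], 0, 0) := by
  simp [tiltStep, h1, h2]

lemma tiltUp_eq (t : List String) (a : List String) (o d : Nat)
    (h : t.foldl tiltStep ([], 0, 0) = (a, o, d)) :
    tiltUp t = a ++ List.replicate o "O" ++ List.replicate d "." := by
  simp only [tiltUp, h]

lemma tiltStep_fold_sum (t : List String) (acc : List String) (o d : Nat) :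
    (t.foldl tiltStep (acc, o, d)).1.length + (t.foldl tiltStep (acc, o, d)).2.1 +
      (t.foldl tiltStep (acc, o, d)).2.2 = acc.length + o + d + t.length := by
  induction t generalizing acc o d with
  | nil => simp
  | cons x xs ih =>
    by_cases h1 : x == "O"
    · rw [List.foldl_cons, tiltStep_O acc o d x h1, ih]
      simp only [List.length_cons]
      omega
    · by_cases h2 : x == "."
      · rw [List.foldl_cons, tiltStep_dot acc o d x (by simpa using h1) h2, ih]
        simp only [List.length_cons]
        omega
      · rw [List.foldl_cons, tiltStep_obs acc o d x (by simpa using h1) (by simpa using h2), ih]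
        simp only [List.length_cons, List.length_append, List.length_replicate,
          List.length_nil]
        omega

lemma tiltUp_length (t : List String) : (tiltUp t).length = t.length := by
  obtain ⟨a, o, d, hstate⟩ : ∃ a o d, t.foldl tiltStep ([], 0, 0) = (a, o, d) :=
    ⟨_, _, _, rfl⟩
  have hsum := tiltStep_fold_sum t [] 0 0
  rw [hstate] at hsum
  simp only [List.length_nil] at hsum
  rw [tiltUp_eq t a o d hstate]
  simp only [List.length_append, List.length_replicate]
  omega

lemma tiltStep_fold_last (t : List String) (acc : List String) (o d : Nat)
    (h : acc.getLast? ≠ some ".") :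
    (t.foldl tiltStep (acc, o, d)).1.getLast? ≠ some "." := by
  induction t generalizing acc o d with
  | nil => exact h
  | cons x xs ih =>
    by_cases h1 : x == "O"
    · rw [List.foldl_cons, tiltStep_O acc o d x h1]
      exact ih acc _ _ h
    · by_cases h2 : x == "."
      · rw [List.foldl_cons, tiltStep_dot acc o d x (by simpa using h1) h2]
        exact ih acc _ _ h
      · rw [List.foldl_cons, tiltStep_obs acc o d x (by simpa using h1) (by simpa using h2)]
        apply ih
        rw [show acc ++ List.replicate o "O" ++ List.replicate d "." ++ [x] =
          (acc ++ List.replicate o "O" ++ List.replicate d ".") ++ [x] by simp]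
        rw [List.getLast?_concat]
        simp only [ne_eq, Option.some.injEq]
        intro hxe
        exact h2 (by simp [hxe])

lemma tiltUp_snoc_not_O (t : List String) (x : String) (hx : (x == "O") = false) :
    tiltUp (t ++ [x]) = tiltUp t ++ [x] := by
  obtain ⟨a, o, d, hstate⟩ : ∃ a o d, t.foldl tiltStep ([], 0, 0) = (a, o, d) :=
    ⟨_, _, _, rfl⟩
  rw [tiltUp_eq t a o d hstate]
  by_cases h2 : x == "."
  · have hfold : (t ++ [x]).foldl tiltStep ([], 0, 0) = (a, o, d + 1) := by
      rw [List.foldl_append, hstate, List.foldl_cons, tiltStep_dot a o d x hx h2,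
        List.foldl_nil]
    rw [tiltUp_eq _ a o (d + 1) hfold, show x = "." from eq_of_beq h2,
      List.replicate_succ' (n := d)]
    simp
  · have hfold : (t ++ [x]).foldl tiltStep ([], 0, 0) =
        (a ++ List.replicate o "O" ++ List.replicate d "." ++ [x], 0, 0) := by
      rw [List.foldl_append, hstate, List.foldl_cons,
        tiltStep_obs a o d x hx (by simpa using h2), List.foldl_nil]
    rw [tiltUp_eq _ _ 0 0 hfold]
    simp

lemma tiltUp_rev_snoc_O (t : List String) :
    (tiltUp (t ++ ["O"])).reverse =
      List.replicate (((tiltUp t).reverse.takeWhile (fun s => s == ".")).length) "." ++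
        "O" :: (tiltUp t).reverse.drop (((tiltUp t).reverse.takeWhile (fun s => s == ".")).length) := by
  obtain ⟨a, o, d, hstate⟩ : ∃ a o d, t.foldl tiltStep ([], 0, 0) = (a, o, d) :=
    ⟨_, _, _, rfl⟩
  have hA : tiltUp t = a ++ List.replicate o "O" ++ List.replicate d "." :=
    tiltUp_eq t a o d hstate
  have hfold : tiltUp (t ++ ["O"]) = a ++ List.replicate (o + 1) "O" ++ List.replicate d "." := by
    apply tiltUp_eq
    rw [List.foldl_append, hstate, List.foldl_cons, tiltStep_O a o d "O" rfl, List.foldl_nil]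
  have hrev : (tiltUp t).reverse =
      List.replicate d "." ++ ((List.replicate o "O").reverse ++ a.reverse) := by
    rw [hA]
    simp [List.reverse_append]
  have hlast : a.getLast? ≠ some "." := by
    have h := tiltStep_fold_last t [] 0 0 (by simp)
    rwa [hstate] at h
  have hne : ((List.replicate o "O").reverse ++ a.reverse).head? ≠ some "." := by
    cases o with
    | zero => simpa [List.head?_reverse] using hlast
    | succ o' =>
      rw [List.reverse_replicate, List.replicate_succ, List.cons_append]
      simp
  have hk : ((tiltUp t).reverse.takeWhile (fun s => s == ".")).length = d := by
    rw [hrev]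
    exact dots_takeWhile d _ hne
  have hdrop : (tiltUp t).reverse.drop d = (List.replicate o "O").reverse ++ a.reverse := by
    rw [hrev]
    exact drop_replicate d _
  rw [hfold, hk, hdrop]
  simp [List.reverse_append, List.replicate_succ]
  exact replicate_cons_self o a.reverse

-- ---- the central equivalence of the two line procedures ----

lemma rollLine_eq_rev_tiltUp_rev (l : List String) :
    rollLine l = (tiltUp l.reverse).reverse := by
  induction l with
  | nil => rfl
  | cons x xs ih =>
    by_cases hx : x == "O"
    · rw [show x = "O" from eq_of_beq hx]
      rw [rollLine_cons_O, ih]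
      rw [show ("O" :: xs).reverse = xs.reverse ++ ["O"] by simp]
      rw [tiltUp_rev_snoc_O]
    · rw [rollLine_cons_not_O x xs (by simpa using hx), ih]
      rw [show (x :: xs).reverse = xs.reverse ++ [x] by simp]
      rw [tiltUp_snoc_not_O _ _ (by simpa using hx)]
      simp

-- ---- assembling the matrices ----

lemma main_eq (m : List (List String)) : tilt_matrix m = tilt_matrix_alt m := by
  by_cases hw0 : minWidth m = 0
  · simp only [tilt_matrix, tilt_matrix_alt, pyZip, hw0]
    simp [minWidth]
  · have hm : m ≠ [] := fun h => hw0 (by rw [h]; rfl)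
    have hH0 : 0 < m.length := List.length_pos_iff.mpr hm
    simp only [tilt_matrix, tilt_matrix_alt, pyZip]
    have hb : (minWidth m == 0) = false := by simpa using hw0
    rw [hb, if_neg Bool.false_ne_true]
    set cols := (List.range (minWidth m)).map (fun j => m.map (fun row => row.getD j "")) with hcols
    have hcollen : ∀ c ∈ cols, c.length = m.length := by
      intro c hc
      rw [hcols] at hc
      obtain ⟨j, _, rfl⟩ := List.mem_map.mp hc
      simp
    have hitm2 : (cols.map List.reverse).map rollLine = cols.map (fun c => (tiltUp c).reverse) := by
      rw [List.map_map]
      apply List.map_congr_left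
      intro c _
      show rollLine c.reverse = (tiltUp c).reverse
      rw [rollLine_eq_rev_tiltUp_rev, List.reverse_reverse]
    rw [hitm2]
    have hcolsne : cols ≠ [] := by
      rw [hcols]
      simp only [ne_eq, List.map_eq_nil_iff, List.range_eq_nil]
      exact hw0
    have hminw : minWidth (cols.map (fun c => (tiltUp c).reverse)) = m.length := by
      apply minWidth_const
      · simpa using hcolsne
      · intro c hc
        obtain ⟨c0, hc0, rfl⟩ := List.mem_map.mp hc
        simp [tiltUp_length, hcollen c0 hc0]
    rw [hminw]
    apply List.ext_getElem (by simp)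
    intro i h1 h2
    have hi : i < m.length := by simpa using h1
    simp only [List.getElem_map, List.getElem_range, List.getElem_reverse, List.length_map,
      List.length_range, List.map_map]
    apply List.map_congr_left
    intro c hc
    have hcH : c.length = m.length := hcollen c hc
    have htH : (tiltUp c).length = m.length := by rw [tiltUp_length, hcH]
    simp only [Function.comp_apply]
    rw [List.getD_eq_getElem ((tiltUp c).reverse) "" (n := i) (by simp [htH]; omega)]
    rw [List.getD_eq_getElem (tiltUp c) "" (n := m.length - 1 - i) (by rw [htH]; omega)]
    rw [List.getElem_reverse]
    congr 1
    simp [htH]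

-- ===== VERDICT (by name: the statement is the Claim_ definition above) =====
theorem tilt_matrix_spec : Claim_equal_tilt_matrix := by
  intro m _
  unfold Spec_tilt_matrix
  exact main_eq m
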